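-- pv_equiv track=rewrite | github.com/DiviqLud/HackBulgaria | SecondAssignment/magic_square.py | check_second_diagonal
-- ===== SOURCE A (Python) =====
-- def check_second_diagonal(sum_of_first_row, matrix):
--     sum_of_current = 0
--     for row in range(0, len(matrix)):
--         for col in range(0, len(matrix)):
--             if row == len(matrix) - col - 1:
--                 sum_of_current += matrix[row][col]
--     if sum_of_current == sum_of_first_row:
--         return True
--     else:
--         return False
-- ===== SOURCE B (Python) =====
-- def check_second_diagonal(sum_of_first_row, matrix):
--     # O(n): visit only the n anti-diagonal cells directly
--     n = len(matrix)
--     return sum(row[n - 1 - i] for i, row in enumerate(matrix)) == sum_of_first_row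
-- ===== Notes on version B (the rewrite author's own statement) =====
-- stated objective: faster
-- what changed: Instead of scanning all n*n cells and testing row == n-col-1, B sums the n anti-diagonal cells row[n-1-i] directly in one enumerate pass.
import Mathlib
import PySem

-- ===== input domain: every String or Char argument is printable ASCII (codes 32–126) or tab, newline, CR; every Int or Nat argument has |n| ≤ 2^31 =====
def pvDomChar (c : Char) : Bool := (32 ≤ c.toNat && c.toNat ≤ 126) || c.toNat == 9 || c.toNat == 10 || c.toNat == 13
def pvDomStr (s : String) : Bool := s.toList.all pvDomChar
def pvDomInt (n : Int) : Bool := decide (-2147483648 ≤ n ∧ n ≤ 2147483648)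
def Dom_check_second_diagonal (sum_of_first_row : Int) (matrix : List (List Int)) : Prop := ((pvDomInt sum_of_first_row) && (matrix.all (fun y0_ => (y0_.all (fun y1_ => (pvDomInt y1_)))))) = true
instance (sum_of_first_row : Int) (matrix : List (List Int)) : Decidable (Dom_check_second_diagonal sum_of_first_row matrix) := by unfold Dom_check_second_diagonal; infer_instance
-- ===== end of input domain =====

-- B sums the n anti-diagonal cells directly (one pass) instead of A's n*n scan with a test.

-- ===== PORT A =====
-- nested index loops; matrix[row][col] is in range on Pre_, ported as pyGetD (none-case excluded by Pre_)
def check_second_diagonal (sum_of_first_row : Int) (matrix : List (List Int)) : Bool :=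
  let n : Int := matrix.length
  let sum_of_current : Int :=
    (PySem.List.pyRange 0 n 1).foldl (fun acc row =>
      (PySem.List.pyRange 0 n 1).foldl (fun acc2 col =>
        if row = n - col - 1 then
          acc2 + PySem.List.pyGetD (PySem.List.pyGetD matrix row []) col 0
        else acc2) acc) 0
  if sum_of_current = sum_of_first_row then true else false

-- ===== PORT B =====
-- one enumerate pass over the rows; row[n-1-i] in range on Pre_, ported as pyGetD
def check_second_diagonal_alt (sum_of_first_row : Int) (matrix : List (List Int)) : Bool :=
  let n : Int := matrix.length
  decide (((PySem.List.enumerate matrix).foldl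
      (fun acc p => acc + PySem.List.pyGetD p.2 (n - 1 - p.1) 0) 0) = sum_of_first_row)

-- ===== PRECONDITION & SPEC =====
-- Pre_ excludes exactly the ragged matrices on which Python A raises IndexError
-- (some row r is shorter than n - r, so matrix[r][n-1-r] does not exist); B raises there too.
def Pre_check_second_diagonal (sum_of_first_row : Int) (matrix : List (List Int)) : Prop :=
  ∀ r < matrix.length, matrix.length - 1 - r < (matrix.getD r []).length
instance (sum_of_first_row : Int) (matrix : List (List Int)) : Decidable (Pre_check_second_diagonal sum_of_first_row matrix) := by unfold Pre_check_second_diagonal; infer_instance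

def pvWitness_check_second_diagonal : Int × List (List Int) := (6, [[1, 2, 3], [4, 5, 6], [3, 2, 1]])

def Spec_check_second_diagonal (sum_of_first_row : Int) (matrix : List (List Int)) (out : Bool) : Prop := out = check_second_diagonal_alt sum_of_first_row matrix
instance (sum_of_first_row : Int) (matrix : List (List Int)) (out : Bool) : Decidable (Spec_check_second_diagonal sum_of_first_row matrix out) := by unfold Spec_check_second_diagonal; infer_instance

-- ===== CLAIM (what is proved, stated in full; the proofs are below) =====
def Claim_equal_check_second_diagonal : Prop := ∀ (sum_of_first_row : Int) (matrix : List (List Int)), Dom_check_second_diagonal sum_of_first_row matrix → Pre_check_second_diagonal sum_of_first_row matrix → Spec_check_second_diagonal sum_of_first_row matrix (check_second_diagonal sum_of_first_row matrix)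

-- ===== LEMMAS AND PROOFS =====

-- A's inner column loop adds exactly the single anti-diagonal cell v[n-1-row].
lemma inner_loop_eq (n : Int) (v : List Int) (row : Int)
    (h0 : 0 ≤ row) (h1 : row < n) (acc : Int) :
    (PySem.List.pyRange 0 n 1).foldl (fun acc2 col =>
        if row = n - col - 1 then acc2 + PySem.List.pyGetD v col 0 else acc2) acc
      = acc + PySem.List.pyGetD v (n - 1 - row) 0 := by
  have hsplit : PySem.List.pyRange 0 n 1
      = PySem.List.pyRange 0 (n - 1 - row) 1
        ++ ((n - 1 - row) :: PySem.List.pyRange (n - 1 - row + 1) n 1) := by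
    rw [PySem.List.pyRange_one_append 0 (n - 1 - row) n (by omega) (by omega),
        PySem.List.pyRange_one_cons (a := n - 1 - row) (b := n) (by omega)]
  have h₁ := PySem.List.foldl_congr_mem (PySem.List.pyRange 0 (n - 1 - row) 1)
    (fun acc2 col => if row = n - col - 1 then acc2 + PySem.List.pyGetD v col 0 else acc2)
    (fun acc2 _ => acc2) acc
    (by
      intro a x hx
      rw [PySem.List.mem_pyRange_one] at hx
      have hne : row ≠ n - x - 1 := by omega
      simp only [if_neg hne])
  have h₂ := PySem.List.foldl_congr_mem (PySem.List.pyRange (n - 1 - row + 1) n 1)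
    (fun acc2 col => if row = n - col - 1 then acc2 + PySem.List.pyGetD v col 0 else acc2)
    (fun acc2 _ => acc2) (acc + PySem.List.pyGetD v (n - 1 - row) 0)
    (by
      intro a x hx
      rw [PySem.List.mem_pyRange_one] at hx
      have hne : row ≠ n - x - 1 := by omega
      simp only [if_neg hne])
  rw [hsplit, List.foldl_append, h₁]
  simp only [List.foldl_fixed]
  rw [List.foldl_cons, if_pos (by omega), h₂]
  simp only [List.foldl_fixed]

-- B's enumerate loop as a sum over row indices.
lemma enum_loop_eq (n : Int) :
    ∀ (xs : List (List Int)) (s acc : Int),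
    (PySem.List.enumerate xs s).foldl
        (fun acc p => acc + PySem.List.pyGetD p.2 (n - 1 - p.1) 0) acc
      = acc + ((List.range xs.length).map
          (fun k => PySem.List.pyGetD (xs.getD k []) (n - 1 - (s + k)) 0)).sum := by
  intro xs
  induction xs with
  | nil => intro s acc; simp [PySem.List.enumerate_nil]
  | cons x xs ih =>
    intro s acc
    rw [PySem.List.enumerate_cons, List.foldl_cons, ih (s + 1)]
    simp [List.range_succ_eq_map, List.map_map, Function.comp_def]
    have hc : (fun (k:Nat) => PySem.List.pyGetD (xs[k]?.getD []) (n - 1 - (s + 1 + (k:Int))) 0)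
        = (fun (k:Nat) => PySem.List.pyGetD (xs[k]?.getD []) (n - 1 - (s + ((k:Int) + 1))) 0) := by
      funext k; congr 1; omega
    rw [hc, add_assoc]

theorem check_second_diagonal_spec : Claim_equal_check_second_diagonal := by
  intro s matrix _ _
  unfold Spec_check_second_diagonal check_second_diagonal check_second_diagonal_alt
  simp only
  have houter := PySem.List.foldl_congr_mem (PySem.List.pyRange 0 (matrix.length : Int) 1)
    (fun acc row =>
      (PySem.List.pyRange 0 (matrix.length : Int) 1).foldl (fun acc2 col =>
        if row = (matrix.length : Int) - col - 1 then
          acc2 + PySem.List.pyGetD (PySem.List.pyGetD matrix row []) col 0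
        else acc2) acc)
    (fun acc row => acc + PySem.List.pyGetD (PySem.List.pyGetD matrix row [])
      ((matrix.length : Int) - 1 - row) 0) 0
    (by
      intro a row hrow
      rw [PySem.List.mem_pyRange_one] at hrow
      exact inner_loop_eq _ _ _ hrow.1 hrow.2 a)
  have hA : (PySem.List.pyRange 0 (matrix.length : Int) 1).foldl (fun acc row =>
      (PySem.List.pyRange 0 (matrix.length : Int) 1).foldl (fun acc2 col =>
        if row = (matrix.length : Int) - col - 1 then
          acc2 + PySem.List.pyGetD (PySem.List.pyGetD matrix row []) col 0
        else acc2) acc) 0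
      = (PySem.List.enumerate matrix).foldl
          (fun acc p => acc + PySem.List.pyGetD p.2 ((matrix.length : Int) - 1 - p.1) 0) 0 := by
    rw [houter, PySem.List.foldl_add, enum_loop_eq, PySem.List.pyRange_one]
    simp [List.map_map, Function.comp_def]
  rw [hA]
  split_ifs with h
  · simp [h]
  · simp [h]
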